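-- pv_equiv track=rewrite | github.com/oyeprashar/Data-structures-and-algorithms | Bit Magic/Convert binary to decimal using bitwise operator in constant space.py | convert2Binary
-- ===== SOURCE A (Python) =====
-- def convert2Binary(num):
--     p = 1
--     sum = 0
--     while num > 0:
--         curr = num & 1
--         sum += curr*p
--
--         num = num >> 1
--         p *= 10
--
--     return sum
-- ===== SOURCE B (Python) =====
-- def convert2Binary(num):
--     if num <= 0:
--         return 0
--     return convert2Binary(num >> 1) * 10 + (num & 1)
-- ===== Notes on version B (the rewrite author's own statement) =====
-- stated objective: simpler
-- what changed: Replaces the iterative loop that maintains a place-multiplier and a running sum by a direct recursion on the right-shifted value, combining the recursively built higher digits with the current low bit.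
import Mathlib
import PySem

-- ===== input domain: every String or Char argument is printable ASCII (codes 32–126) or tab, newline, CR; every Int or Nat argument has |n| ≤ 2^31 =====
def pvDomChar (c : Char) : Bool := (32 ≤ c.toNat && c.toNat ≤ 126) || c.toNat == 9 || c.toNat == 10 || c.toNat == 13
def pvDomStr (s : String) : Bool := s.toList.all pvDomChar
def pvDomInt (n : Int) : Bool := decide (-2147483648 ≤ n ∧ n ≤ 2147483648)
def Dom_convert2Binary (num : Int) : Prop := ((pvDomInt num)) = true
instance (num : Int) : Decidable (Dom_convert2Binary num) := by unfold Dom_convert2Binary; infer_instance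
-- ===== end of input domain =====

-- B replaces A's accumulator loop (place multiplier p, running sum) by a direct
-- recursion on num >> 1 building the digits back-to-front; same cost, simpler.

-- ===== PORT A =====
-- the while loop of A, state (num, p, sum); Python's 'num >> 1' is Lean's 'num >>> 1',
-- 'num & 1' is PySem.Int.band num 1
def convert2BinaryLoop (num p sum : Int) : Int :=
  if num > 0 then
    convert2BinaryLoop (num >>> (1:Nat)) (p * 10) (sum + PySem.Int.band num 1 * p)
  else sum
termination_by num.toNat
decreasing_by rw [Int.shiftRight_eq_div_pow]; omega

def convert2Binary (num : Int) : Int := convert2BinaryLoop num 1 0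

-- ===== PORT B =====
def convert2Binary_alt (num : Int) : Int :=
  if num ≤ 0 then 0
  else convert2Binary_alt (num >>> (1:Nat)) * 10 + PySem.Int.band num 1
termination_by num.toNat
decreasing_by rw [Int.shiftRight_eq_div_pow]; omega

-- ===== PRECONDITION & SPEC =====
def Spec_convert2Binary (num : Int) (out : Int) : Prop := out = convert2Binary_alt num
instance (num : Int) (out : Int) : Decidable (Spec_convert2Binary num out) := by unfold Spec_convert2Binary; infer_instance

-- ===== CLAIM (what is proved, stated in full; the proofs are below) =====
def Claim_equal_convert2Binary : Prop := ∀ (num : Int), Dom_convert2Binary num → Spec_convert2Binary num (convert2Binary num)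

-- ===== LEMMAS AND PROOFS =====
-- loop invariant: the loop returns sum + (B's value) * p
theorem convert2BinaryLoop_eq (num p sum : Int) :
    convert2BinaryLoop num p sum = sum + convert2Binary_alt num * p := by
  by_cases h : num > 0
  · have halt : convert2Binary_alt num
        = convert2Binary_alt (num >>> (1:Nat)) * 10 + PySem.Int.band num 1 := by
      rw [convert2Binary_alt]; rw [if_neg (by omega)]
    rw [convert2BinaryLoop, if_pos h,
      convert2BinaryLoop_eq (num >>> (1:Nat)) (p * 10) (sum + PySem.Int.band num 1 * p),
      halt]
    ring
  · rw [convert2BinaryLoop, if_neg h, convert2Binary_alt, if_pos (by omega)]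
    ring
termination_by num.toNat
decreasing_by rw [Int.shiftRight_eq_div_pow]; omega

-- ===== VERDICT (by name: the statement is the Claim_ definition above) =====
theorem convert2Binary_spec : Claim_equal_convert2Binary := by
  intro num _
  unfold Spec_convert2Binary convert2Binary
  rw [convert2BinaryLoop_eq]
  ring
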